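-- pv_equiv track=rewrite | github.com/jsnjuan/Competitive-Programming | Google'sCodingCompetitions/KickStart/2021/Round C/Practice/SmallerStrings_6_9pts.py | gen_sol
-- ===== SOURCE A (Python) =====
-- def gen_sol(S, N, K):
--
--     # Tomamos la mitad de la cadena, que incluye el caracter
--     # de enmedio si la cadena es de longitud impar
--     ss = S[:(N+1)//2]
--
--     #Tenemos dos casos:
--
--     # Caso I: el número de subcadenas menor lexicográficamente que ss
--
--     n1 = 0
--
--     p = len(ss) - 1
--     for c in ss:
--         n1 = n1 + (ord(c)-97)*pow(K, p, 10**9 + 7)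
--         n1 = n1%(10**9 + 7)
--         p = p-1
--
--
--     # Caso II: la subcadena ss es igual, en este caso hay que invertir
--     # manualmente la cadena para ver si es palíndromo o no
--     if len(S)%2==0:
--         ss2 = S[:N//2] + S[:N//2][::-1]
--     else:
--         ss2 = S[:N//2] + S[N//2]+S[:N//2][::-1]
--
--     n2 = 1 if ss2 < S else 0
--
--     return (n1 + n2)%(10**9 + 7)
-- ===== SOURCE B (Python) =====
-- def gen_sol(S, N, K):
--     M = 10**9 + 7
--     # Horner's method: one multiply-add per character instead of a modular pow per term
--     n1 = 0
--     for c in S[:(N + 1) // 2]: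
--         n1 = (n1 * K + ord(c) - 97) % M
--     h = S[:N // 2]
--     mid = S[N // 2] if len(S) % 2 else ''
--     n2 = 1 if h + mid + h[::-1] < S else 0
--     return (n1 + n2) % M
-- ===== Notes on version B (the rewrite author's own statement) =====
-- stated objective: faster
-- what changed: The Case-I loop computes the polynomial value by Horner's method (one modular multiply-add per character) instead of calling modular exponentiation pow(K,p,mod) for every term.
import Mathlib
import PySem

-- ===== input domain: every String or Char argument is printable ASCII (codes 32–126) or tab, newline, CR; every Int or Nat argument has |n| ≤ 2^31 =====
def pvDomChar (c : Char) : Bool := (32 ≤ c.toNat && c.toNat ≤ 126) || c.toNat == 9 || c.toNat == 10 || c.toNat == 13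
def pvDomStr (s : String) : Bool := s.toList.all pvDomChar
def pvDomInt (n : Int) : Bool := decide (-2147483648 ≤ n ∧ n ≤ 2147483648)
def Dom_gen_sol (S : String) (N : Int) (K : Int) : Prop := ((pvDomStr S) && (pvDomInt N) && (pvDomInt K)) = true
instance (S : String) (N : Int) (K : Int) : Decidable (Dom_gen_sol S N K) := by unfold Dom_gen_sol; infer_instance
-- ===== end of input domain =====

-- B replaces the per-term pow(K, p, mod) evaluation with Horner's method (one modular
-- multiply-add per character): asymptotically faster, same value.

-- ===== PORT A =====
def gsM : Int := 10 ^ 9 + 7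

-- A's Case-I loop: n1 = (n1 + (ord(c)-97)*pow(K, p, mod)) % mod; p = p - 1
-- (p is only consulted at values ≥ 0, so taking .toNat for the Nat exponent of powMod is exact)
def gsLoopA (K : Int) : List Char → Int → Int → Int
  | [], n1, _ => n1
  | c :: cs, n1, p =>
      gsLoopA K cs (PySem.Int.mod (n1 + ((c.toNat : Int) - 97) * PySem.Int.powMod K p.toNat gsM) gsM) (p - 1)

def gen_sol (S : String) (N : Int) (K : Int) : Int :=
  let ss := PySem.List.slice S.toList none (some (PySem.Int.floordiv (N + 1) 2))
  let n1 := gsLoopA K ss 0 ((ss.length : Int) - 1)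
  let ss2 :=
    if S.toList.length % 2 = 0 then
      PySem.List.slice S.toList none (some (PySem.Int.floordiv N 2))
        ++ (PySem.List.slice S.toList none (some (PySem.Int.floordiv N 2))).reverse
    else
      -- S[N//2]: IndexError when out of range; Pre_gen_sol excludes that, default is irrelevant there
      PySem.List.slice S.toList none (some (PySem.Int.floordiv N 2))
        ++ [PySem.List.pyGetD S.toList (PySem.Int.floordiv N 2) 'a']
        ++ (PySem.List.slice S.toList none (some (PySem.Int.floordiv N 2))).reverse
  let n2 : Int := if ss2 < S.toList then 1 else 0
  PySem.Int.mod (n1 + n2) gsM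

-- ===== PORT B =====
-- B's Horner loop: n1 = (n1*K + ord(c) - 97) % M
def gsLoopB (K : Int) : List Char → Int → Int
  | [], a => a
  | c :: cs, a => gsLoopB K cs (PySem.Int.mod (a * K + ((c.toNat : Int) - 97)) gsM)

def gen_sol_alt (S : String) (N : Int) (K : Int) : Int :=
  let n1 := gsLoopB K (PySem.List.slice S.toList none (some (PySem.Int.floordiv (N + 1) 2))) 0
  let h := PySem.List.slice S.toList none (some (PySem.Int.floordiv N 2))
  let mid :=
    if S.toList.length % 2 = 1 then [PySem.List.pyGetD S.toList (PySem.Int.floordiv N 2) 'a'] else []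
  let n2 : Int := if h ++ mid ++ h.reverse < S.toList then 1 else 0
  PySem.Int.mod (n1 + n2) gsM

-- ===== PRECONDITION & SPEC =====
-- Pre_ excludes exactly the inputs where S[N//2] raises IndexError (odd |S|, index out of range);
-- both A and B raise there.
def Pre_gen_sol (S : String) (N : Int) (K : Int) : Prop :=
  S.toList.length % 2 = 1 → PySem.Raise.InRange S.toList.length (PySem.Int.floordiv N 2)
instance (S : String) (N : Int) (K : Int) : Decidable (Pre_gen_sol S N K) := by
  unfold Pre_gen_sol; infer_instance

def pvWitness_gen_sol : String × Int × Int := ("abc", 3, 26)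

def Spec_gen_sol (S : String) (N : Int) (K : Int) (out : Int) : Prop := out = gen_sol_alt S N K
instance (S : String) (N : Int) (K : Int) (out : Int) : Decidable (Spec_gen_sol S N K out) := by
  unfold Spec_gen_sol; infer_instance

-- ===== CLAIM (what is proved, stated in full; the proofs are below) =====
def Claim_equal_gen_sol : Prop := ∀ (S : String) (N : Int) (K : Int), Dom_gen_sol S N K → Pre_gen_sol S N K → Spec_gen_sol S N K (gen_sol S N K)

-- ===== LEMMAS AND PROOFS =====

theorem gsM_pos : (0:Int) < gsM := by norm_num [gsM]

theorem mod_gsM (a : Int) : PySem.Int.mod a gsM = a % gsM :=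
  PySem.Int.mod_eq_emod_of_pos gsM_pos

-- Horner value without any reduction
def gsH (K : Int) : List Char → Int → Int
  | [], a => a
  | c :: cs, a => gsH K cs (a * K + ((c.toNat : Int) - 97))

theorem gsH_shift (K : Int) (cs : List Char) : ∀ a : Int,
    gsH K cs a = a * K ^ cs.length + gsH K cs 0 := by
  induction cs with
  | nil => intro a; simp [gsH]
  | cons c cs ih =>
      intro a
      simp only [gsH, List.length_cons]
      rw [ih (a * K + ((c.toNat : Int) - 97)), ih ((0:Int) * K + ((c.toNat : Int) - 97))]
      ring

theorem gsLoopB_eq (K : Int) (cs : List Char) : ∀ a b : Int, a % gsM = b % gsM →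
    gsLoopB K cs a % gsM = gsH K cs b % gsM := by
  induction cs with
  | nil => intro a b h; simpa [gsLoopB, gsH] using h
  | cons c cs ih =>
      intro a b h
      simp only [gsLoopB, gsH, mod_gsM]
      apply ih
      rw [Int.emod_emod_of_dvd _ dvd_rfl,
          Int.add_emod (a * K), Int.mul_emod a K, h, ← Int.mul_emod, ← Int.add_emod]

theorem gsLoopA_eq (K : Int) (cs : List Char) : ∀ a : Int,
    gsLoopA K cs a ((cs.length : Int) - 1) % gsM = (a + gsH K cs 0) % gsM := by
  induction cs with
  | nil => intro a; simp [gsLoopA, gsH]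
  | cons c cs ih =>
      intro a
      have hp : ((List.length (c :: cs) : Int) - 1) = (cs.length : Int) := by
        simp [List.length_cons]
      have hp2 : ((cs.length : Int)).toNat = cs.length := by omega
      have hstep : gsLoopA K (c :: cs) a ((List.length (c :: cs) : Int) - 1)
          = gsLoopA K cs
              (PySem.Int.mod (a + ((c.toNat : Int) - 97) * PySem.Int.powMod K cs.length gsM) gsM)
              ((cs.length : Int) - 1) := by
        rw [hp]; simp [gsLoopA, hp2]
      rw [hstep, ih]
      have hpow : PySem.Int.powMod K cs.length gsM = K ^ cs.length % gsM := by
        simp [PySem.Int.powMod, mod_gsM]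
      have hH : gsH K (c :: cs) 0 = ((c.toNat : Int) - 97) * K ^ cs.length + gsH K cs 0 := by
        show gsH K cs (0 * K + ((c.toNat : Int) - 97)) = _
        rw [gsH_shift]; ring
      rw [hpow, hH, mod_gsM]
      set d := ((c.toNat : Int) - 97)
      set g := gsH K cs 0
      set l := cs.length
      have h1 : (d * (K ^ l % gsM)) % gsM = (d * K ^ l) % gsM := by
        rw [Int.mul_emod, Int.emod_emod_of_dvd _ dvd_rfl, ← Int.mul_emod]
      rw [Int.add_emod _ g, Int.emod_emod_of_dvd _ dvd_rfl,
          Int.add_emod a (d * (K ^ l % gsM)), h1, ← Int.add_emod a, ← Int.add_emod]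
      ring_nf

-- ===== VERDICT (by name: the statement is the Claim_ definition above) =====
theorem gen_sol_spec : Claim_equal_gen_sol := by
  intro S N K _ _
  unfold Spec_gen_sol gen_sol gen_sol_alt
  have hparity : S.toList.length % 2 = 0 ∨ S.toList.length % 2 = 1 := Nat.mod_two_eq_zero_or_one _
  have hss2 :
      (if S.toList.length % 2 = 0 then
        PySem.List.slice S.toList none (some (PySem.Int.floordiv N 2))
          ++ (PySem.List.slice S.toList none (some (PySem.Int.floordiv N 2))).reverse
      else
        PySem.List.slice S.toList none (some (PySem.Int.floordiv N 2))
          ++ [PySem.List.pyGetD S.toList (PySem.Int.floordiv N 2) 'a']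
          ++ (PySem.List.slice S.toList none (some (PySem.Int.floordiv N 2))).reverse)
      = PySem.List.slice S.toList none (some (PySem.Int.floordiv N 2))
          ++ (if S.toList.length % 2 = 1 then
                [PySem.List.pyGetD S.toList (PySem.Int.floordiv N 2) 'a'] else [])
          ++ (PySem.List.slice S.toList none (some (PySem.Int.floordiv N 2))).reverse := by
    rcases hparity with h | h
    · have h' : S.length % 2 = 0 := by simpa using h
      simp [h']
    · have h' : S.length % 2 = 1 := by simpa using h
      simp [h']
  simp only [hss2]
  set ss := PySem.List.slice S.toList none (some (PySem.Int.floordiv (N + 1) 2))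
  set n2 : Int := if PySem.List.slice S.toList none (some (PySem.Int.floordiv N 2))
      ++ (if S.toList.length % 2 = 1 then
            [PySem.List.pyGetD S.toList (PySem.Int.floordiv N 2) 'a'] else [])
      ++ (PySem.List.slice S.toList none (some (PySem.Int.floordiv N 2))).reverse < S.toList
    then (1:Int) else 0
  have hA : gsLoopA K ss 0 ((ss.length : Int) - 1) % gsM = gsH K ss 0 % gsM := by
    simpa using gsLoopA_eq K ss 0
  have hB : gsLoopB K ss 0 % gsM = gsH K ss 0 % gsM := gsLoopB_eq K ss 0 0 rfl
  rw [mod_gsM, mod_gsM, Int.add_emod _ n2, hA, ← hB, ← Int.add_emod]
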